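-- pv_equiv track=rewrite | github.com/DungLuongTuan/project3 | apis/injured_detector_rule_base.py | remove_redundant_content
-- ===== SOURCE A (Python) =====
-- def remove_redundant_content(text):
-- 	### remove content inside ()
-- 	text_ = ''
-- 	ok = True
-- 	for i in range(len(text)):
-- 		if (text[i] == '('):
-- 			ok = False
-- 			continue
-- 		if (text[i] == ')'):
-- 			ok = True
-- 			continue
-- 		if (ok):
-- 			text_ += text[i]
-- 	text = text_
-- 	### remove content inside ""
-- 	text_ = ''
-- 	ok = True
-- 	for i in range(len(text)):
-- 		if ((text[i] == '"') and (ok == True)):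
-- 			ok = False
-- 			continue
-- 		if ((text[i] == '"') and (ok == False)):
-- 			ok = True
-- 			continue
-- 		if (ok):
-- 			text_ += text[i]
-- 	return text_
-- ===== SOURCE B (Python) =====
-- def remove_redundant_content(text):
--     out = []
--     in_paren = False
--     in_quote = False
--     for c in text:
--         if in_paren:
--             in_paren = (c != ')')
--         elif c == '(':
--             in_paren = True
--         elif c == ')':
--             pass
--         elif c == '"':
--             in_quote = not in_quote
--         elif not in_quote:
--             out.append(c)
--     return ''.join(out)
-- ===== Notes on version B (the rewrite author's own statement) =====
-- stated objective: faster
-- what changed: A's two sequential filtering passes (strip parentheses content, then strip double-quote content) are fused into one single-pass state machine over the text maintaining in_paren and in_quote flags, collecting kept chars in a list instead of repeated string concatenation.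
import Mathlib
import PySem

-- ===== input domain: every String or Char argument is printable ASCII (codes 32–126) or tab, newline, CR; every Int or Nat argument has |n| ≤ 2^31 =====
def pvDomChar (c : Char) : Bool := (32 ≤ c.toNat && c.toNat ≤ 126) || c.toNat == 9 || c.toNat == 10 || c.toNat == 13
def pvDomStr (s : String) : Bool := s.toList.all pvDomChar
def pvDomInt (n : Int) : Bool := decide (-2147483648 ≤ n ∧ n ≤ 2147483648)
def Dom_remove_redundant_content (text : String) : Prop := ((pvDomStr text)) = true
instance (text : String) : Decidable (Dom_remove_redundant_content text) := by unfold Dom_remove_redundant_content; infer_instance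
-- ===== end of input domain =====

-- B fuses A's two sequential filtering passes into one single-pass state machine
-- with in_paren/in_quote flags (objective: faster, constant factor / avoids string rebuilds).

-- ===== PORT A =====
-- pass 1 of A: for each char, '(' sets ok := false, ')' sets ok := true, else append if ok
def pvPass1Step (st : List Char × Bool) (c : Char) : List Char × Bool :=
  if c = '(' then (st.1, false)
  else if c = ')' then (st.1, true)
  else if st.2 then (st.1 ++ [c], st.2) else st

-- pass 2 of A: '"' toggles ok, else append if ok
def pvPass2Step (st : List Char × Bool) (c : Char) : List Char × Bool :=
  if c = '"' ∧ st.2 = true then (st.1, false)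
  else if c = '"' ∧ st.2 = false then (st.1, true)
  else if st.2 then (st.1 ++ [c], st.2) else st

def remove_redundant_content (text : String) : String :=
  let text1 := (text.toList.foldl pvPass1Step ([], true)).1
  String.mk (text1.foldl pvPass2Step ([], true)).1

-- ===== PORT B =====
-- single pass: while in_paren drop everything (')' leaves); otherwise '(' enters,
-- ')' is dropped, '"' toggles in_quote, other chars kept iff not in_quote
def pvAltLoop : List Char → Bool → Bool → List Char
  | [], _, _ => []
  | c :: cs, in_paren, in_quote =>
    if in_paren then pvAltLoop cs (c ≠ ')') in_quote
    else if c = '(' then pvAltLoop cs true in_quote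
    else if c = ')' then pvAltLoop cs false in_quote
    else if c = '"' then pvAltLoop cs false (!in_quote)
    else if in_quote then pvAltLoop cs false in_quote
    else c :: pvAltLoop cs false in_quote

def remove_redundant_content_alt (text : String) : String :=
  String.mk (pvAltLoop text.toList false false)

-- ===== PRECONDITION & SPEC =====
def Spec_remove_redundant_content (text : String) (out : String) : Prop := out = remove_redundant_content_alt text
instance (text : String) (out : String) : Decidable (Spec_remove_redundant_content text out) := by unfold Spec_remove_redundant_content; infer_instance

-- ===== CLAIM (what is proved, stated in full; the proofs are below) =====
def Claim_equal_remove_redundant_content : Prop := ∀ (text : String), Dom_remove_redundant_content text → Spec_remove_redundant_content text (remove_redundant_content text)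

-- ===== LEMMAS AND PROOFS =====

-- recursive characterisations of A's two foldl passes
def pvP1 : List Char → Bool → List Char
  | [], _ => []
  | c :: cs, ok =>
    if c = '(' then pvP1 cs false
    else if c = ')' then pvP1 cs true
    else if ok then c :: pvP1 cs ok else pvP1 cs ok

def pvP2 : List Char → Bool → List Char
  | [], _ => []
  | c :: cs, ok =>
    if c = '"' then pvP2 cs (!ok)
    else if ok then c :: pvP2 cs ok else pvP2 cs ok

theorem pvPass1_foldl (cs : List Char) (acc : List Char) (ok : Bool) :
    (cs.foldl pvPass1Step (acc, ok)).1 = acc ++ pvP1 cs ok := by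
  induction cs generalizing acc ok with
  | nil => simp [pvP1]
  | cons c cs ih =>
    simp only [List.foldl_cons, pvPass1Step, pvP1]
    by_cases h1 : c = '(' <;> by_cases h2 : c = ')' <;> cases ok <;>
      simp [h1, h2, ih]

theorem pvPass2_foldl (cs : List Char) (acc : List Char) (ok : Bool) :
    (cs.foldl pvPass2Step (acc, ok)).1 = acc ++ pvP2 cs ok := by
  induction cs generalizing acc ok with
  | nil => simp [pvP2]
  | cons c cs ih =>
    simp only [List.foldl_cons, pvPass2Step, pvP2]
    by_cases h1 : c = '"' <;> cases ok <;> simp [h1, ih]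

theorem pvAlt_eq (cs : List Char) (in_paren in_quote : Bool) :
    pvAltLoop cs in_paren in_quote = pvP2 (pvP1 cs (!in_paren)) (!in_quote) := by
  induction cs generalizing in_paren in_quote with
  | nil => simp [pvAltLoop, pvP1, pvP2]
  | cons c cs ih =>
    simp only [pvAltLoop, pvP1]
    by_cases h1 : c = '(' <;> by_cases h2 : c = ')' <;> by_cases h3 : c = '"' <;>
      cases in_paren <;> cases in_quote <;>
        simp_all [pvP2]

-- ===== VERDICT (by name: the statement is the Claim_ definition above) =====
theorem remove_redundant_content_spec : Claim_equal_remove_redundant_content := by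
  intro text _
  unfold Spec_remove_redundant_content remove_redundant_content remove_redundant_content_alt
  rw [pvAlt_eq]
  simp [pvPass1_foldl, pvPass2_foldl]
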